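-- pv_equiv track=rewrite | github.com/johnmarriott/advent-of-code-2023 | day14/2.py | shift_vectors
-- ===== SOURCE A (Python) =====
-- def shift_vectors(vectors):
--     """
--     for a list of vectors, shift each of them to the start
--
--     e.g. [#, 0, 1, 0, #, 1, 0, #]
--       -> [#, 1, 0, 0, #, 1, 0, #]
--     to each vector in the list
--     """
--     shifted_vectors = []
--     for vector in vectors:
--         # split vector into sub-lists of elements between
--         # hash characters as in part 1
--         cube_indices = [i for i, x in enumerate(vector) if x == "#"]
--         shifted_vector = ['#']
--
--         for i in range(1, len(cube_indices)):
--             sublist = vector[cube_indices[i - 1] + 1 : cube_indices[i]]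
--             sublist.sort(reverse=True)
--             shifted_vector.extend(sublist)
--             shifted_vector.append('#')
--
--         shifted_vectors.append(shifted_vector)
--
--     return shifted_vectors
-- ===== SOURCE B (Python) =====
-- def shift_vectors(vectors):
--     """
--     for a list of vectors, shift each of them to the start
--     (split each vector on '#' in one pass, then sort each inner
--     segment descending; material before the first '#' / after the
--     last '#' is dropped, as in the original)
--     """
--     shifted_vectors = []
--     for vector in vectors:
--         segments = []
--         current = []
--         for x in vector:
--             if x == "#":
--                 segments.append(current)
--                 current = []
--             else:
--                 current.append(x)
--         segments.append(current)
--
--         shifted_vector = ['#']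
--         for segment in segments[1:-1]:
--             shifted_vector += sorted(segment, reverse=True) + ['#']
--         shifted_vectors.append(shifted_vector)
--
--     return shifted_vectors
-- ===== Notes on version B (the rewrite author's own statement) =====
-- stated objective: simpler
-- what changed: B replaces A's enumerate-the-'#'-positions plus index/slice bookkeeping by a single split pass on '#' followed by sorting each inner segment, with no index arithmetic.
import Mathlib
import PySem

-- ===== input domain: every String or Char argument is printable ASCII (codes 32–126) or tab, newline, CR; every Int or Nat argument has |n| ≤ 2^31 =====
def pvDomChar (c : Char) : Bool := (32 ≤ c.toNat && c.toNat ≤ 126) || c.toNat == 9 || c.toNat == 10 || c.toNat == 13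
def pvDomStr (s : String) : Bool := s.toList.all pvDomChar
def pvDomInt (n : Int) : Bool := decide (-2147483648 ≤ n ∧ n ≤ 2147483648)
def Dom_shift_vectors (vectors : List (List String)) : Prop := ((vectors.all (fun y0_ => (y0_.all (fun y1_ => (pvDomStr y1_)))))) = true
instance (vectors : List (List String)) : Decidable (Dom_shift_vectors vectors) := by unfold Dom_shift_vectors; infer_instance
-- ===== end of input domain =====

-- B replaces A's index/slice bookkeeping (enumerate '#' positions, slice between
-- consecutive ones) by a single split pass on '#'; objective: simpler (same cost).

-- ===== PORT A =====
def shift_vectors (vectors : List (List String)) : List (List String) :=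
  vectors.foldl (fun shifted_vectors vector =>
    let cube_indices : List Int :=
      ((PySem.List.enumerate vector 0).filter (fun p => p.2 == "#")).map (fun p => p.1)
    let shifted_vector :=
      (PySem.List.pyRange 1 (PySem.List.len cube_indices) 1).foldl (fun sv i =>
        let sublist := PySem.List.slice vector
          (some (PySem.List.pyGetD cube_indices (i - 1) 0 + 1))
          (some (PySem.List.pyGetD cube_indices i 0))
        let sublist := PySem.List.sorted sublist (fun x => x) true
        (sv ++ sublist) ++ ["#"]) ["#"]
    shifted_vectors ++ [shifted_vector]) []

-- ===== PORT B =====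
def shift_vectors_alt (vectors : List (List String)) : List (List String) :=
  vectors.foldl (fun shifted_vectors vector =>
    let sc := vector.foldl
      (fun (sc : List (List String) × List String) x =>
        if x == "#" then (sc.1 ++ [sc.2], []) else (sc.1, sc.2 ++ [x]))
      ([], [])
    let segments := sc.1 ++ [sc.2]
    let shifted_vector :=
      (PySem.List.slice segments (some 1) (some (-1))).foldl
        (fun sv segment => sv ++ (PySem.List.sorted segment (fun x => x) true ++ ["#"]))
        ["#"]
    shifted_vectors ++ [shifted_vector]) []

-- ===== PRECONDITION & SPEC =====
def Spec_shift_vectors (vectors : List (List String)) (out : List (List String)) : Prop := out = shift_vectors_alt vectors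
instance (vectors : List (List String)) (out : List (List String)) : Decidable (Spec_shift_vectors vectors out) := by unfold Spec_shift_vectors; infer_instance

-- ===== CLAIM (what is proved, stated in full; the proofs are below) =====
def Claim_equal_shift_vectors : Prop := ∀ (vectors : List (List String)), Dom_shift_vectors vectors → Spec_shift_vectors vectors (shift_vectors vectors)

-- ===== LEMMAS AND PROOFS =====

/-- Canonical left-to-right split of a vector on `"#"` (proof-side helper). -/
def splitL (cur : List String) : List String → List (List String)
  | [] => [cur]
  | x :: xs => if x = "#" then cur :: splitL [] xs else splitL (cur ++ [x]) xs

/-- Positions of `"#"` starting at absolute offset `k` (proof-side helper). -/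
def hashIdx : List String → Nat → List Int
  | [], _ => []
  | x :: xs, k => if x = "#" then (k : Int) :: hashIdx xs (k + 1) else hashIdx xs (k + 1)

theorem splitL_ne_nil (cur : List String) (v : List String) : splitL cur v ≠ [] := by
  induction v generalizing cur with
  | nil => simp [splitL]
  | cons x xs ih => by_cases h : x = "#" <;> simp [splitL, h, ih]

theorem hashIdx_eq_enum (v : List String) (s : Nat) :
    ((PySem.List.enumerate v (s : Int)).filter (fun p => p.2 == "#")).map (fun p => p.1)
      = hashIdx v s := by
  induction v generalizing s with
  | nil => simp [PySem.List.enumerate_nil, hashIdx]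
  | cons x xs ih =>
    rw [PySem.List.enumerate_cons, List.filter_cons]
    have hs := ih (s + 1)
    push_cast at hs
    by_cases h : x = "#"
    · simp [h, hashIdx, hs]
    · simp [h, hashIdx, hs]

theorem hashIdx_append (u w : List String) (k : Nat) :
    hashIdx (u ++ w) k = hashIdx u k ++ hashIdx w (k + u.length) := by
  induction u generalizing k with
  | nil => simp [hashIdx]
  | cons x xs ih =>
    by_cases h : x = "#" <;> simp [hashIdx, h, ih, Nat.add_assoc, Nat.add_comm 1 xs.length]

theorem hashIdx_of_no_hash (u : List String) (k : Nat) (h : "#" ∉ u) : hashIdx u k = [] := by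
  induction u generalizing k with
  | nil => rfl
  | cons x xs ih =>
    simp only [List.mem_cons, not_or] at h
    simp [hashIdx, Ne.symm h.1, ih _ h.2]

theorem splitL_append_no_hash (u w : List String) (cur : List String) (h : "#" ∉ u) :
    splitL cur (u ++ w) = splitL (cur ++ u) w := by
  induction u generalizing cur with
  | nil => simp
  | cons x xs ih =>
    simp only [List.mem_cons, not_or] at h
    have hx : x ≠ "#" := fun e => h.1 e.symm
    simp [splitL, hx, ih _ h.2, List.append_assoc]

theorem exists_decomp (v : List String) (h : "#" ∈ v) :
    ∃ u r, v = u ++ "#" :: r ∧ "#" ∉ u := by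
  refine ⟨v.takeWhile (fun x => !(x == "#")), (v.dropWhile (fun x => !(x == "#"))).tail, ?_, ?_⟩
  · have hd : v.dropWhile (fun x => !(x == "#")) ≠ [] := by
      intro he
      rw [List.dropWhile_eq_nil_iff] at he
      simpa using he "#" h
    have hh : (v.dropWhile (fun x => !(x == "#"))).head hd = "#" := by
      have := List.head_dropWhile_not (fun x => !(x == "#")) hd
      simpa using this
    conv_lhs => rw [← List.takeWhile_append_dropWhile (p := fun x => !(x == "#")) (l := v),
      ← List.cons_head_tail hd, hh]
  · intro hx
    have := List.mem_takeWhile_imp hx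
    simp at this

theorem range_pairs (L : List Int) :
    (PySem.List.pyRange 1 (PySem.List.len L) 1).map
        (fun i => (PySem.List.pyGetD L (i - 1) 0, PySem.List.pyGetD L i 0))
      = L.zip L.tail := by
  apply List.ext_getElem
  · simp [PySem.List.length_pyRange_one]
  · intro j h1 h2
    have hj : j < L.length - 1 := by
      simp [PySem.List.length_pyRange_one] at h1; omega
    simp only [List.getElem_map, PySem.List.getElem_pyRange_one, List.getElem_zip,
      List.getElem_tail]
    have e1 : (1 : Int) + (j : Int) - 1 = ((j : Nat) : Int) := by ring
    have e2 : (1 : Int) + (j : Int) = (((j + 1 : Nat)) : Int) := by push_cast; ring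
    rw [e1, e2, PySem.List.pyGetD_natCast, PySem.List.pyGetD_natCast,
      List.getD_eq_getElem _ _ (by omega), List.getD_eq_getElem _ _ (by omega)]

theorem pair_slices (v : List String) : ∀ (n : Nat) (r u : List String), r.length ≤ n →
    v = u ++ "#" :: r →
    (((u.length : Int) :: hashIdx r (u.length + 1)).zip (hashIdx r (u.length + 1))).map
        (fun p => PySem.List.slice v (some (p.1 + 1)) (some p.2))
      = (splitL [] r).dropLast := by
  intro n
  induction n with
  | zero =>
    intro r u hl _
    have : r = [] := List.length_eq_zero_iff.mp (Nat.le_zero.mp hl)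
    subst this
    simp [hashIdx, splitL]
  | succ n ih =>
    intro r u hl hv
    by_cases hmem : "#" ∈ r
    · obtain ⟨q, t, hr, hq⟩ := exists_decomp r hmem
      have ht : t.length ≤ n := by
        have := congrArg List.length hr
        simp at this; omega
    -- index list of r after the hash at position |u|
      have hidx : hashIdx r (u.length + 1)
          = ((u.length + 1 + q.length : Nat) : Int) :: hashIdx t (u.length + 1 + q.length + 1) := by
        rw [hr, hashIdx_append, hashIdx_of_no_hash q _ hq]
        simp [hashIdx]
      have hsplit : splitL [] r = q :: splitL [] t := by
        rw [hr, splitL_append_no_hash q _ [] hq]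
        simp [splitL]
      have hslice : PySem.List.slice v (some ((u.length : Int) + 1))
          (some ((u.length + 1 + q.length : Nat) : Int)) = q := by
        have e : ((u.length : Int) + 1) = ((u.length + 1 : Nat) : Int) := by push_cast; ring
        rw [e, PySem.List.slice_natCast, hv, hr]
        have e2 : u ++ "#" :: (q ++ "#" :: t) = (u ++ ["#"]) ++ (q ++ "#" :: t) := by simp
        have e3 : u.length + 1 = (u ++ ["#"]).length := by simp
        rw [e2, e3, List.drop_left]
        have e4 : (u ++ ["#"]).length + q.length - (u ++ ["#"]).length = q.length := by omega
        rw [e4]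
        exact List.take_left
      have hrec := ih t (u ++ "#" :: q) ht (by rw [hv, hr]; simp)
      have hlen : (u ++ "#" :: q).length = u.length + 1 + q.length := by simp; omega
      rw [hlen] at hrec
      rw [hidx, hsplit, List.zip_cons_cons, List.map_cons, hslice,
        List.dropLast_cons_of_ne_nil (splitL_ne_nil [] t), hrec]
    · rw [hashIdx_of_no_hash r _ hmem]
      have : splitL ([] : List String) r = [r] := by
        have := splitL_append_no_hash r [] [] hmem
        simpa using this
      simp [this]

theorem per_vector (v : List String) :
    (PySem.List.pyRange 1 (PySem.List.len (hashIdx v 0)) 1).foldl (fun sv i =>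
        (sv ++ PySem.List.sorted (PySem.List.slice v
            (some (PySem.List.pyGetD (hashIdx v 0) (i - 1) 0 + 1))
            (some (PySem.List.pyGetD (hashIdx v 0) i 0))) (fun x => x) true) ++ ["#"]) ["#"]
      = ((splitL [] v).tail.dropLast).foldl
          (fun sv segment => sv ++ (PySem.List.sorted segment (fun x => x) true ++ ["#"])) ["#"] := by
  simp only [List.append_assoc]
  rw [PySem.List.foldl_append_eq_flatMap, PySem.List.foldl_append_eq_flatMap]
  have key : (PySem.List.pyRange 1 (PySem.List.len (hashIdx v 0)) 1).map
        (fun i => PySem.List.slice v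
            (some (PySem.List.pyGetD (hashIdx v 0) (i - 1) 0 + 1))
            (some (PySem.List.pyGetD (hashIdx v 0) i 0)))
      = (splitL [] v).tail.dropLast := by
    have h2 : (PySem.List.pyRange 1 (PySem.List.len (hashIdx v 0)) 1).map
          (fun i => PySem.List.slice v
              (some (PySem.List.pyGetD (hashIdx v 0) (i - 1) 0 + 1))
              (some (PySem.List.pyGetD (hashIdx v 0) i 0)))
        = ((hashIdx v 0).zip (hashIdx v 0).tail).map
            (fun p => PySem.List.slice v (some (p.1 + 1)) (some p.2)) := by
      rw [← range_pairs (hashIdx v 0), List.map_map]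
      rfl
    rw [h2]
    by_cases hmem : "#" ∈ v
    · obtain ⟨u, r, hv, hu⟩ := exists_decomp v hmem
      have hidx : hashIdx v 0 = (u.length : Int) :: hashIdx r (u.length + 1) := by
        rw [hv, hashIdx_append, hashIdx_of_no_hash u _ hu]
        simp [hashIdx]
      have hsplit : splitL [] v = u :: splitL [] r := by
        rw [hv, splitL_append_no_hash u _ [] hu]
        simp [splitL]
      rw [hidx, hsplit, List.tail_cons, List.tail_cons]
      exact pair_slices v r.length r u le_rfl hv
    · rw [hashIdx_of_no_hash v _ hmem]
      have : splitL ([] : List String) v = [v] := by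
        have := splitL_append_no_hash v [] [] hmem
        simpa using this
      simp [this]
  rw [show (PySem.List.pyRange 1 (PySem.List.len (hashIdx v 0)) 1).flatMap
        (fun i => PySem.List.sorted (PySem.List.slice v
            (some (PySem.List.pyGetD (hashIdx v 0) (i - 1) 0 + 1))
            (some (PySem.List.pyGetD (hashIdx v 0) i 0))) (fun x => x) true ++ ["#"])
      = ((PySem.List.pyRange 1 (PySem.List.len (hashIdx v 0)) 1).map
          (fun i => PySem.List.slice v
              (some (PySem.List.pyGetD (hashIdx v 0) (i - 1) 0 + 1))
              (some (PySem.List.pyGetD (hashIdx v 0) i 0)))).flatMap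
          (fun s => PySem.List.sorted s (fun x => x) true ++ ["#"])
      from (List.flatMap_map
          (fun i => PySem.List.slice v
              (some (PySem.List.pyGetD (hashIdx v 0) (i - 1) 0 + 1))
              (some (PySem.List.pyGetD (hashIdx v 0) i 0)))
          (fun s => PySem.List.sorted s (fun x => x) true ++ ["#"])
          (PySem.List.pyRange 1 (PySem.List.len (hashIdx v 0)) 1)).symm, key]

theorem segs_eq (v : List String) : ∀ (segs : List (List String)) (cur : List String),
    (v.foldl (fun (sc : List (List String) × List String) x =>
        if x == "#" then (sc.1 ++ [sc.2], []) else (sc.1, sc.2 ++ [x])) (segs, cur)).1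
      ++ [(v.foldl (fun (sc : List (List String) × List String) x =>
        if x == "#" then (sc.1 ++ [sc.2], []) else (sc.1, sc.2 ++ [x])) (segs, cur)).2]
      = segs ++ splitL cur v := by
  induction v with
  | nil => simp [splitL]
  | cons x xs ih =>
    intro segs cur
    by_cases h : x = "#"
    · simpa [splitL, h, List.append_assoc] using ih (segs ++ [cur]) []
    · simpa [splitL, h] using ih segs (cur ++ [x])

theorem slice_one_neg_one {α : Type} (l : List α) (h : l ≠ []) :
    PySem.List.slice l (some 1) (some (-1)) = l.tail.dropLast := by
  have hn : 1 ≤ l.length := List.length_pos_iff.mpr h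
  simp only [PySem.List.slice, Int.reduceNeg, Order.lt_one_iff, PySem.List.clampIdx_neg_ofNat,
    zero_le_one, PySem.List.clampIdx_of_nonneg, Int.toNat_one]
  rw [Nat.min_eq_left hn, List.dropLast_eq_take, List.drop_one, List.length_tail]

-- ===== VERDICT (by name: the statement is the Claim_ definition above) =====
theorem shift_vectors_spec : Claim_equal_shift_vectors := by
  intro vectors _
  unfold Spec_shift_vectors shift_vectors shift_vectors_alt
  rw [PySem.List.foldl_append_singleton_eq_map, PySem.List.foldl_append_singleton_eq_map,
    List.nil_append, List.nil_append]
  apply List.map_congr_left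
  intro v _
  dsimp only
  have hc := hashIdx_eq_enum v 0
  rw [Nat.cast_zero] at hc
  rw [hc, segs_eq v [] [], List.nil_append, slice_one_neg_one _ (splitL_ne_nil [] v)]
  exact per_vector v
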